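-- pv_equiv track=rewrite | github.com/dhlyuxt/create-structure-md | scripts/v2_phase4.py | _split_ids_are_derived_from_checked
-- ===== SOURCE A (Python) =====
-- def _split_ids_are_derived_from_checked(split_ids, checked_ids, errors):
--     unresolved_ids = set()
--     empty_suffix_ids = []
--     for split_id in split_ids:
--         if split_id in checked_ids:
--             continue
--
--         derived_from_checked_id = False
--         for checked_id in sorted(checked_ids, key=lambda value: (-len(value), value)):
--             prefix = f"{checked_id}::"
--             if not split_id.startswith(prefix):
--                 continue
--             derived_from_checked_id = True
--             if not split_id.removeprefix(prefix).strip():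
--                 empty_suffix_ids.append(split_id)
--             break
--
--         if derived_from_checked_id:
--             continue
--
--         unresolved_ids.add(split_id)
--     if empty_suffix_ids:
--         errors.append(
--             "split_diagram_ids must use a non-empty derived suffix: "
--             + ", ".join(sorted(empty_suffix_ids))
--         )
--     return unresolved_ids
-- ===== SOURCE B (Python) =====
-- def _longest_checked_prefix_boundary(split_id, checked_ids):
--     # Scan the '::' boundaries of split_id, longest prefix first, testing set
--     # membership -- no sorting of checked_ids per split_id.
--     for i in reversed(range(len(split_id) - 1)):
--         if split_id[i:i + 2] == "::" and split_id[:i] in checked_ids: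
--             return i
--     return None
--
--
-- def _split_ids_are_derived_from_checked(split_ids, checked_ids, errors):
--     unresolved_ids = set()
--     empty_suffix_ids = []
--     for split_id in split_ids:
--         if split_id in checked_ids:
--             continue
--         i = _longest_checked_prefix_boundary(split_id, checked_ids)
--         if i is None:
--             unresolved_ids.add(split_id)
--         elif not split_id[i + 2:].strip():
--             empty_suffix_ids.append(split_id)
--     if empty_suffix_ids:
--         errors.append(
--             "split_diagram_ids must use a non-empty derived suffix: "
--             + ", ".join(sorted(empty_suffix_ids))
--         )
--     return unresolved_ids
-- ===== Notes on version B (the rewrite author's own statement) =====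
-- stated objective: faster
-- what changed: Instead of sorting checked_ids by (-len, value) for every split_id and testing startswith against each, B scans each split_id's '::' boundary positions longest-first and does one set-membership test per boundary; the errors side effect is reproduced identically.
import Mathlib
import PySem

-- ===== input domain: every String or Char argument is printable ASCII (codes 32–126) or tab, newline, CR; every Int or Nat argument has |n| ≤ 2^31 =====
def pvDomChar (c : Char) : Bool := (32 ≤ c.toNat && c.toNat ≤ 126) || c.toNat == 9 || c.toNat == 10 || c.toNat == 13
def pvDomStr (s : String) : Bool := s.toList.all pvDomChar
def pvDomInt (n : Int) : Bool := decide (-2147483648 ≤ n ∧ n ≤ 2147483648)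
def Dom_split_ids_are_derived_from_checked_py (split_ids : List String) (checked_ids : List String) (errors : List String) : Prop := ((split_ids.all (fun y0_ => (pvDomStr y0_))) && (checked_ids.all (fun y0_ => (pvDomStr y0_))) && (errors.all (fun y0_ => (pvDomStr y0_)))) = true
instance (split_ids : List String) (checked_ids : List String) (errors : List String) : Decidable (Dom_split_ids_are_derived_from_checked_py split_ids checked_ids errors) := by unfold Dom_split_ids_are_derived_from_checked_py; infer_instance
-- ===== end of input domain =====

-- B replaces A's per-split_id sort of checked_ids (key (-len, value)) + startswith scan by a
-- longest-first scan of split_id's '::' boundary positions with one set-membership test each.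
-- The RETURN VALUE only is proved equal: A also appends one message to `errors` (in-place
-- mutation); Source B performs the identical mutation, but the ports do not model it.

-- ===== PORT A =====
-- inner loop: "for checked_id in sorted(checked_ids, key=lambda value: (-len(value), value)): …; break"
-- (the `empty_suffix_ids` branch taken before the break only mutates `errors`, never the return)
def pvInnerA (split_id : String) : List String → Bool
  | [] => false
  | checked_id :: rest =>
      if PySem.Str.startswith split_id (checked_id ++ "::") then true
      else pvInnerA split_id rest

def split_ids_are_derived_from_checked_py (split_ids : List String) (checked_ids : List String) (errors : List String) : List String :=
  split_ids.foldl
    (fun (unresolved_ids : PySem.Set String) split_id =>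
      if PySem.Set.contains checked_ids split_id then unresolved_ids
      else if pvInnerA split_id
          (PySem.List.sorted2 checked_ids (fun value => -(PySem.Str.len value)) (fun value => value)) then
        unresolved_ids
      else PySem.Set.add unresolved_ids split_id)
    PySem.Set.empty

-- ===== PORT B =====
-- helper _longest_checked_prefix_boundary; the nonnegative slices split_id[i:i+2] and
-- split_id[:i] are ported as drop/take (exact: PySem.List.slice_natCast / slice_to_natCast)
def pvBoundary? (checked_ids : List String) (cs : List Char) : List Nat → Option Nat
  | [] => none
  | i :: rest =>
      if ((cs.drop i).take 2 == [':', ':']) && PySem.Set.contains checked_ids (String.ofList (cs.take i)) then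
        some i
      else pvBoundary? checked_ids cs rest

def split_ids_are_derived_from_checked_py_alt (split_ids : List String) (checked_ids : List String) (errors : List String) : List String :=
  split_ids.foldl
    (fun (unresolved_ids : PySem.Set String) split_id =>
      if PySem.Set.contains checked_ids split_id then unresolved_ids
      else
        match pvBoundary? checked_ids split_id.toList ((List.range (split_id.toList.length - 1)).reverse) with
        | none => PySem.Set.add unresolved_ids split_id
        | some _ => unresolved_ids)
    PySem.Set.empty

-- ===== PRECONDITION & SPEC =====
def Spec_split_ids_are_derived_from_checked_py (split_ids : List String) (checked_ids : List String) (errors : List String) (out : List String) : Prop := out = split_ids_are_derived_from_checked_py_alt split_ids checked_ids errors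
instance (split_ids : List String) (checked_ids : List String) (errors : List String) (out : List String) : Decidable (Spec_split_ids_are_derived_from_checked_py split_ids checked_ids errors out) := by unfold Spec_split_ids_are_derived_from_checked_py; infer_instance

-- ===== CLAIM (what is proved, stated in full; the proofs are below) =====
def Claim_equal_split_ids_are_derived_from_checked_py : Prop := ∀ (split_ids : List String) (checked_ids : List String) (errors : List String), Dom_split_ids_are_derived_from_checked_py split_ids checked_ids errors → Spec_split_ids_are_derived_from_checked_py split_ids checked_ids errors (split_ids_are_derived_from_checked_py split_ids checked_ids errors)

-- ===== LEMMAS AND PROOFS =====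

-- A's inner loop finds a match iff some checked_id ++ "::" is a prefix
theorem pvInnerA_iff (s : String) (l : List String) :
    pvInnerA s l = true ↔ ∃ c ∈ l, c.toList ++ [':', ':'] <+: s.toList := by
  induction l with
  | nil => simp [pvInnerA]
  | cons c rest ih =>
      show (if PySem.Str.startswith s (c ++ "::") = true then true else pvInnerA s rest) = true ↔ _
      by_cases h : PySem.Str.startswith s (c ++ "::") = true
      · rw [if_pos h]
        rw [PySem.Str.startswith_eq, PySem.Chars.startswith_iff] at h
        simp only [String.toList_append] at h
        constructor
        · intro _; exact ⟨c, List.mem_cons_self, by simpa using h⟩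
        · intro _; rfl
      · rw [if_neg h, ih]
        constructor
        · rintro ⟨d, hd, hp⟩; exact ⟨d, List.mem_cons_of_mem _ hd, hp⟩
        · rintro ⟨d, hd, hp⟩
          rcases List.mem_cons.mp hd with rfl | hd'
          · exfalso; apply h
            rw [PySem.Str.startswith_eq, PySem.Chars.startswith_iff]
            simpa using hp
          · exact ⟨d, hd', hp⟩

-- B's boundary scan succeeds iff some listed index is a matching '::' boundary
theorem pvBoundary?_isSome_iff (checked : List String) (cs : List Char) (idxs : List Nat) :
    (pvBoundary? checked cs idxs).isSome = true ↔
      ∃ i ∈ idxs, (cs.drop i).take 2 = [':', ':'] ∧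
        PySem.Set.contains checked (String.ofList (cs.take i)) = true := by
  induction idxs with
  | nil => simp [pvBoundary?]
  | cons i rest ih =>
      show (if (((cs.drop i).take 2 == [':', ':']) && PySem.Set.contains checked (String.ofList (cs.take i))) = true then some i else pvBoundary? checked cs rest).isSome = true ↔ _
      by_cases h : (((cs.drop i).take 2 == [':', ':']) && PySem.Set.contains checked (String.ofList (cs.take i))) = true
      · rw [if_pos h]
        simp only [Bool.and_eq_true, beq_iff_eq] at h
        constructor
        · intro _; exact ⟨i, List.mem_cons_self, h.1, h.2⟩
        · intro _; rfl
      · rw [if_neg h, ih]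
        constructor
        · rintro ⟨j, hj, hp⟩; exact ⟨j, List.mem_cons_of_mem _ hj, hp⟩
        · rintro ⟨j, hj, hp⟩
          rcases List.mem_cons.mp hj with rfl | hj'
          · exfalso; apply h
            simp only [Bool.and_eq_true, beq_iff_eq]
            exact ⟨hp.1, hp.2⟩
          · exact ⟨j, hj', hp⟩

-- the bridge: "some checked_id ++ '::' is a prefix" ↔ "some '::' boundary has a checked prefix"
theorem pvBridge (checked : List String) (cs : List Char) :
    (∃ c ∈ checked, c.toList ++ [':', ':'] <+: cs) ↔
      ∃ i ∈ (List.range (cs.length - 1)).reverse, (cs.drop i).take 2 = [':', ':'] ∧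
        PySem.Set.contains checked (String.ofList (cs.take i)) = true := by
  constructor
  · rintro ⟨c, hc, t, ht⟩
    refine ⟨c.toList.length, ?_, ?_, ?_⟩
    · have : cs.length = c.toList.length + 2 + t.length := by
        rw [← ht]; simp; omega
      simp only [List.mem_reverse, List.mem_range]
      omega
    · rw [← ht]
      have hsplit : c.toList ++ [':', ':'] ++ t = c.toList ++ ([':', ':'] ++ t) := by simp
      rw [hsplit, List.drop_left]
      rfl
    · rw [← ht]
      have hsplit : c.toList ++ [':', ':'] ++ t = c.toList ++ ([':', ':'] ++ t) := by simp
      rw [hsplit, List.take_left]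
      simpa [PySem.Set.contains] using hc
  · rintro ⟨i, hi, h2, hcont⟩
    simp only [List.mem_reverse, List.mem_range] at hi
    refine ⟨String.ofList (cs.take i), ?_, ?_⟩
    · simpa [PySem.Set.contains] using hcont
    · refine ⟨(cs.drop i).drop 2, ?_⟩
      calc String.toList (String.ofList (cs.take i)) ++ [':', ':'] ++ (cs.drop i).drop 2
          = cs.take i ++ ((cs.drop i).take 2 ++ (cs.drop i).drop 2) := by
            rw [h2]; simp
        _ = cs := by rw [List.take_append_drop, List.take_append_drop]

-- the two inner tests agree, as Bools
theorem pvInner_eq (checked : List String) (s : String) :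
    pvInnerA s (PySem.List.sorted2 checked (fun value => -(PySem.Str.len value)) (fun value => value)) =
      (pvBoundary? checked s.toList ((List.range (s.toList.length - 1)).reverse)).isSome := by
  rw [Bool.eq_iff_iff, pvInnerA_iff, pvBoundary?_isSome_iff, ← pvBridge]
  constructor
  · rintro ⟨c, hc, hp⟩
    exact ⟨c, ((PySem.List.sorted2_perm checked _ _ false).mem_iff).mp hc, hp⟩
  · rintro ⟨c, hc, hp⟩
    exact ⟨c, ((PySem.List.sorted2_perm checked _ _ false).mem_iff).mpr hc, hp⟩

-- one step of the two folds agrees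
theorem pvStep_eq (checked : List String) (acc : PySem.Set String) (s : String) :
    (if PySem.Set.contains checked s then acc
     else if pvInnerA s (PySem.List.sorted2 checked (fun value => -(PySem.Str.len value)) (fun value => value)) then acc
     else PySem.Set.add acc s) =
    (if PySem.Set.contains checked s then acc
     else
       match pvBoundary? checked s.toList ((List.range (s.toList.length - 1)).reverse) with
       | none => PySem.Set.add acc s
       | some _ => acc) := by
  by_cases hm : PySem.Set.contains checked s = true
  · rw [if_pos hm, if_pos hm]
  · rw [if_neg hm, if_neg hm, pvInner_eq]
    cases hb : pvBoundary? checked s.toList ((List.range (s.toList.length - 1)).reverse) with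
    | none => simp
    | some i => simp

-- the two folds agree from any accumulator
theorem pvFold_eq (checked : List String) (l : List String) (acc : PySem.Set String) :
    l.foldl
      (fun (unresolved_ids : PySem.Set String) split_id =>
        if PySem.Set.contains checked split_id then unresolved_ids
        else if pvInnerA split_id
            (PySem.List.sorted2 checked (fun value => -(PySem.Str.len value)) (fun value => value)) then
          unresolved_ids
        else PySem.Set.add unresolved_ids split_id) acc =
    l.foldl
      (fun (unresolved_ids : PySem.Set String) split_id =>
        if PySem.Set.contains checked split_id then unresolved_ids
        else
          match pvBoundary? checked split_id.toList ((List.range (split_id.toList.length - 1)).reverse) with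
          | none => PySem.Set.add unresolved_ids split_id
          | some _ => unresolved_ids) acc := by
  induction l generalizing acc with
  | nil => rfl
  | cons s rest ih =>
      simp only [List.foldl_cons]
      rw [pvStep_eq checked acc s]
      exact ih _

-- ===== VERDICT (by name: the statement is the Claim_ definition above) =====
theorem split_ids_are_derived_from_checked_py_spec : Claim_equal_split_ids_are_derived_from_checked_py := by
  intro split_ids checked_ids errors _
  unfold Spec_split_ids_are_derived_from_checked_py
  unfold split_ids_are_derived_from_checked_py split_ids_are_derived_from_checked_py_alt
  exact pvFold_eq checked_ids split_ids PySem.Set.empty
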